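-- pv_equiv track=rewrite | github.com/VictorCastroDeFaria/GAMultiViewSplitting | geneticFunctionsInteger.py | find_two_lowest_indexes
-- ===== SOURCE A (Python) =====
-- def find_two_lowest_indexes(numbers):
--     if len(numbers) < 2:
--         return "List must contain at least two numbers"
--
--     max1_index = 0
--     max2_index = 1
--
--     # Flip indexes if list[0] > list[1] (1 should after 0)
--     if numbers[max1_index] > numbers[max2_index]:
--         max1_index, max2_index = max2_index, max1_index
--
--     for i in range(2, len(numbers)):
--         if numbers[i] < numbers[max1_index]:
--             max2_index = max1_index
--             max1_index = i
--         elif numbers[i] < numbers[max2_index]: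
--             max2_index = i
--     return max1_index, max2_index
-- ===== SOURCE B (Python) =====
-- def find_two_lowest_indexes(numbers):
--     if len(numbers) < 2:
--         return "List must contain at least two numbers"
--     m1 = min(range(len(numbers)), key=lambda i: numbers[i])
--     m2 = min((i for i in range(len(numbers)) if i != m1), key=lambda i: numbers[i])
--     return m1, m2
-- ===== Notes on version B (the rewrite author's own statement) =====
-- stated objective: idiomatic
-- what changed: Replaces the single pass that tracks two running candidate indices (with a swap-initialisation and a two-branch update) by two independent builtin min() scans over the index range: the first picks the earliest argmin, the second the earliest argmin among the remaining indices.
import Mathlib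
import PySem

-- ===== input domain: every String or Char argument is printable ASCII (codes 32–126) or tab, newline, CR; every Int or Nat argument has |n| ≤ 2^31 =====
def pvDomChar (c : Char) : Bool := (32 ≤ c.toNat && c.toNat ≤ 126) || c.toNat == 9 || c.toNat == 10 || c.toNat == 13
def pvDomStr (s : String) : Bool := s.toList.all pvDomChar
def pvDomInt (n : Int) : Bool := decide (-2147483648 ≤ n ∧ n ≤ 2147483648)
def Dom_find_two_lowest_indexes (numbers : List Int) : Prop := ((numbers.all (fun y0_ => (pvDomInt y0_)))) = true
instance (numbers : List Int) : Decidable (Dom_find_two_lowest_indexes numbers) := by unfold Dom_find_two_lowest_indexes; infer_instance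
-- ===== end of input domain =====

-- B replaces A's single two-candidate tracking pass by two builtin-min scans over the
-- index range (idiomatic, same O(n) cost); on lists shorter than 2 both Pythons return
-- a string, which is outside the Int × Int return type, so Pre_ requires length ≥ 2.

-- ===== PORT A =====
-- numbers[i] for an in-range index i (both programs only index inside the list)
def pvVal (numbers : List Int) (i : Int) : Int := PySem.List.pyGetD numbers i 0

-- the body of A's for-loop: one update of the two candidate indices
def pvStepA (numbers : List Int) (st : Int × Int) (i : Int) : Int × Int :=
  if pvVal numbers i < pvVal numbers st.1 then (i, st.1)
  else if pvVal numbers i < pvVal numbers st.2 then (st.1, i)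
  else st

def find_two_lowest_indexes (numbers : List Int) : Int × Int :=
  -- Python A returns a string when len(numbers) < 2; Pre_ excludes those inputs,
  -- the value returned here is irrelevant
  if numbers.length < 2 then (0, 1)
  else
    let init : Int × Int :=
      if pvVal numbers 0 > pvVal numbers 1 then (1, 0) else (0, 1)
    (PySem.List.pyRange 2 (numbers.length : Int) 1).foldl (pvStepA numbers) init

-- ===== PORT B =====
def find_two_lowest_indexes_alt (numbers : List Int) : Int × Int :=
  if numbers.length < 2 then (0, 1)
  else
    let idxs := PySem.List.pyRange 0 (numbers.length : Int) 1
    match PySem.List.min? idxs (fun i => pvVal numbers i) with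
    | none => (0, 1)      -- unreachable: idxs is nonempty (length ≥ 2)
    | some m1 =>
      match PySem.List.min? (idxs.filter (fun i => i ≠ m1)) (fun i => pvVal numbers i) with
      | none => (0, 1)    -- unreachable: at least one index differs from m1
      | some m2 => (m1, m2)

-- ===== PRECONDITION & SPEC =====
-- Pre_ excludes exactly the lists of length < 2, on which A returns the error STRING
-- "List must contain at least two numbers" instead of a pair of ints.
def Pre_find_two_lowest_indexes (numbers : List Int) : Prop := 2 ≤ numbers.length
instance (numbers : List Int) : Decidable (Pre_find_two_lowest_indexes numbers) := by
  unfold Pre_find_two_lowest_indexes; infer_instance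

def pvWitness_find_two_lowest_indexes : List Int := [3, 1, 2]

def Spec_find_two_lowest_indexes (numbers : List Int) (out : Int × Int) : Prop := out = find_two_lowest_indexes_alt numbers
instance (numbers : List Int) (out : Int × Int) : Decidable (Spec_find_two_lowest_indexes numbers out) := by unfold Spec_find_two_lowest_indexes; infer_instance

-- ===== CLAIM (what is proved, stated in full; the proofs are below) =====
def Claim_equal_find_two_lowest_indexes : Prop := ∀ (numbers : List Int), Dom_find_two_lowest_indexes numbers → Pre_find_two_lowest_indexes numbers → Spec_find_two_lowest_indexes numbers (find_two_lowest_indexes numbers)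

-- ===== LEMMAS AND PROOFS =====

-- "m is the earliest index of a minimal value among indices [0, n)"
def pvP1 (numbers : List Int) (n m : Int) : Prop :=
  0 ≤ m ∧ m < n ∧ (∀ j, 0 ≤ j → j < n → pvVal numbers m ≤ pvVal numbers j) ∧
    (∀ j, 0 ≤ j → j < m → pvVal numbers m < pvVal numbers j)

-- "m2 is the earliest index of a minimal value among indices [0, n) other than m1"
def pvP2 (numbers : List Int) (n m1 m2 : Int) : Prop :=
  0 ≤ m2 ∧ m2 < n ∧ m2 ≠ m1 ∧
    (∀ j, 0 ≤ j → j < n → j ≠ m1 → pvVal numbers m2 ≤ pvVal numbers j) ∧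
    (∀ j, 0 ≤ j → j < m2 → j ≠ m1 → pvVal numbers m2 < pvVal numbers j)

theorem pvP1_unique {numbers : List Int} {n a b : Int}
    (ha : pvP1 numbers n a) (hb : pvP1 numbers n b) : a = b := by
  obtain ⟨ha0, han, hale, halt⟩ := ha
  obtain ⟨hb0, hbn, hble, hblt⟩ := hb
  rcases lt_trichotomy a b with h | h | h
  · have h1 := hblt a ha0 h
    have h2 := hale b hb0 hbn
    omega
  · exact h
  · have h1 := halt b hb0 h
    have h2 := hble a ha0 han
    omega

theorem pvP2_unique {numbers : List Int} {n m1 a b : Int}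
    (ha : pvP2 numbers n m1 a) (hb : pvP2 numbers n m1 b) : a = b := by
  obtain ⟨ha0, han, hane, hale, halt⟩ := ha
  obtain ⟨hb0, hbn, hbne, hble, hblt⟩ := hb
  rcases lt_trichotomy a b with h | h | h
  · have h1 := hblt a ha0 h hane
    have h2 := hale b hb0 hbn hbne
    omega
  · exact h
  · have h1 := halt b hb0 h hbne
    have h2 := hble a ha0 han hane
    omega

-- one step of A's loop, at i = n, preserves the invariant for n + 1
theorem pvStepA_pres (numbers : List Int) (n : Int) (st : Int × Int)
    (h1 : pvP1 numbers n st.1) (h2 : pvP2 numbers n st.1 st.2) :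
    pvP1 numbers (n + 1) (pvStepA numbers st n).1 ∧
      pvP2 numbers (n + 1) (pvStepA numbers st n).1 (pvStepA numbers st n).2 := by
  obtain ⟨ha0, han, hale, halt⟩ := h1
  obtain ⟨hb0, hbn, hbne, hble, hblt⟩ := h2
  unfold pvStepA
  by_cases c1 : pvVal numbers n < pvVal numbers st.1
  · simp only [if_pos c1]
    refine ⟨⟨by omega, by omega, ?_, ?_⟩, ⟨ha0, by omega, by omega, ?_, ?_⟩⟩
    · intro j hj0 hjn
      rcases lt_or_ge j n with hj | hj
      · have := hale j hj0 hj; omega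
      · have : j = n := by omega
        simp [this]
    · intro j hj0 hjn
      have := hale j hj0 (by omega); omega
    · intro j hj0 hjn hjne
      rcases lt_or_ge j n with hj | hj
      · exact hale j hj0 hj
      · omega
    · intro j hj0 hja hjne
      exact halt j hj0 hja
  · simp only [if_neg c1]
    by_cases c2 : pvVal numbers n < pvVal numbers st.2
    · simp only [if_pos c2]
      refine ⟨⟨ha0, by omega, ?_, ?_⟩, ⟨by omega, by omega, by omega, ?_, ?_⟩⟩
      · intro j hj0 hjn
        rcases lt_or_ge j n with hj | hj
        · exact hale j hj0 hj
        · have : j = n := by omega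
          simp [this]; omega
      · intro j hj0 hja
        exact halt j hj0 hja
      · intro j hj0 hjn hjne
        rcases lt_or_ge j n with hj | hj
        · have := hble j hj0 hj hjne; omega
        · have : j = n := by omega
          simp [this]
      · intro j hj0 hjn hjne
        have := hble j hj0 (by omega) hjne; omega
    · simp only [if_neg c2]
      refine ⟨⟨ha0, by omega, ?_, halt⟩, ⟨hb0, by omega, hbne, ?_, hblt⟩⟩
      · intro j hj0 hjn
        rcases lt_or_ge j n with hj | hj
        · exact hale j hj0 hj
        · have : j = n := by omega
          simp [this]; omega
      · intro j hj0 hjn hjne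
        rcases lt_or_ge j n with hj | hj
        · exact hble j hj0 hj hjne
        · have : j = n := by omega
          simp [this]; omega

-- A's initial state (after the swap) satisfies the invariant for n = 2
theorem pvInit_inv (numbers : List Int) :
    pvP1 numbers 2 ((if pvVal numbers 0 > pvVal numbers 1 then ((1 : Int), (0 : Int)) else (0, 1))).1 ∧
      pvP2 numbers 2 ((if pvVal numbers 0 > pvVal numbers 1 then ((1 : Int), (0 : Int)) else (0, 1))).1
        ((if pvVal numbers 0 > pvVal numbers 1 then ((1 : Int), (0 : Int)) else (0, 1))).2 := by
  by_cases c : pvVal numbers 0 > pvVal numbers 1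
  · simp only [if_pos c]
    refine ⟨⟨by omega, by omega, ?_, ?_⟩, ⟨by omega, by omega, by omega, ?_, ?_⟩⟩
    · intro j hj0 hj2
      have : j = 0 ∨ j = 1 := by omega
      rcases this with h | h <;> simp [h] <;> omega
    · intro j hj0 hj1
      have : j = 0 := by omega
      simp [this]; omega
    · intro j hj0 hj2 hjne
      have : j = 0 := by omega
      simp [this]
    · intro j hj0 hj0' hjne
      omega
  · simp only [if_neg c]
    refine ⟨⟨by omega, by omega, ?_, ?_⟩, ⟨by omega, by omega, by omega, ?_, ?_⟩⟩
    · intro j hj0 hj2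
      have : j = 0 ∨ j = 1 := by omega
      rcases this with h | h
      · simp [h]
      · simp [h]; omega
    · intro j hj0 hj0'
      omega
    · intro j hj0 hj2 hjne
      have : j = 1 := by omega
      simp [this]
    · intro j hj0 hj1 hjne
      omega

-- A's whole loop: folding over range(2, 2 + k) lands in the invariant at n = 2 + k
theorem pvA_inv (numbers : List Int) (k : Nat) :
    pvP1 numbers (2 + (k : Int))
        (((PySem.List.pyRange 2 (2 + (k : Int)) 1).foldl (pvStepA numbers)
          (if pvVal numbers 0 > pvVal numbers 1 then ((1 : Int), (0 : Int)) else (0, 1)))).1 ∧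
      pvP2 numbers (2 + (k : Int))
        (((PySem.List.pyRange 2 (2 + (k : Int)) 1).foldl (pvStepA numbers)
          (if pvVal numbers 0 > pvVal numbers 1 then ((1 : Int), (0 : Int)) else (0, 1)))).1
        (((PySem.List.pyRange 2 (2 + (k : Int)) 1).foldl (pvStepA numbers)
          (if pvVal numbers 0 > pvVal numbers 1 then ((1 : Int), (0 : Int)) else (0, 1)))).2 := by
  induction k with
  | zero =>
      simpa [PySem.List.pyRange_one_eq_nil] using pvInit_inv numbers
  | succ k ih =>
      have hcast : (2 : Int) + ((k + 1 : Nat) : Int) = (2 + (k : Int)) + 1 := by push_cast; ring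
      rw [hcast, PySem.List.pyRange_one_succ_right (by omega), List.foldl_append]
      simp only [List.foldl_cons, List.foldl_nil]
      exact pvStepA_pres numbers (2 + (k : Int)) _ ih.1 ih.2

-- min? over a list extended on the right is one comparison step
theorem pvMin?_append_singleton {α κ : Type} [LT κ] [DecidableLT κ]
    (l : List α) (x : α) (key : α → κ) :
    PySem.List.min? (l ++ [x]) key =
      match PySem.List.min? l key with
      | none => some x
      | some m => if key x < key m then some x else some m := by
  simp [PySem.List.min?, List.foldl_append]
  cases (List.foldl
      (fun acc y =>
        match acc with
        | none => some y
        | some m => if key y < key m then some y else some m)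
      (none : Option α) l) <;> rfl

-- B's first min: earliest argmin over range(0, k), for every k ≥ 1
theorem pvB1 (numbers : List Int) : ∀ k : Nat, 1 ≤ k →
    ∃ m, PySem.List.min? (PySem.List.pyRange 0 (k : Int) 1) (fun i => pvVal numbers i) = some m ∧
      pvP1 numbers (k : Int) m := by
  intro k
  induction k with
  | zero => omega
  | succ k ih =>
      intro _
      rcases Nat.eq_or_lt_of_le (Nat.one_le_iff_ne_zero.mpr (Nat.succ_ne_zero k)) with h | h
      · -- k + 1 = 1
        have hk : k = 0 := by omega
        subst hk
        refine ⟨0, ?_, by omega, by omega, ?_, by omega⟩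
        · rw [show ((1 : Nat) : Int) = 0 + 1 by omega, PySem.List.pyRange_one_singleton]
          rfl
        · intro j hj0 hj1
          have : j = 0 := by omega
          simp [this]
      · -- k ≥ 1
        obtain ⟨m, hm, hp⟩ := ih (by omega)
        have hcast : ((k + 1 : Nat) : Int) = (k : Int) + 1 := by push_cast; ring
        rw [hcast, PySem.List.pyRange_one_succ_right (by positivity), pvMin?_append_singleton, hm]
        obtain ⟨hm0, hmk, hle, hlt⟩ := hp
        by_cases c : pvVal numbers (k : Int) < pvVal numbers m
        · refine ⟨(k : Int), by simp [c], by omega, by omega, ?_, ?_⟩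
          · intro j hj0 hjn
            rcases lt_or_ge j (k : Int) with hj | hj
            · have := hle j hj0 hj; omega
            · have : j = (k : Int) := by omega
              simp [this]
          · intro j hj0 hjk
            have := hle j hj0 (by omega); omega
        · refine ⟨m, by simp [c], hm0, by omega, ?_, hlt⟩
          intro j hj0 hjn
          rcases lt_or_ge j (k : Int) with hj | hj
          · exact hle j hj0 hj
          · have : j = (k : Int) := by omega
            simp [this]; omega

-- B's second min: earliest argmin over range(0, k) without m1, for every k ≥ 2
theorem pvB2 (numbers : List Int) (m1 : Int) : ∀ k : Nat, 2 ≤ k →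
    ∃ m2, PySem.List.min? ((PySem.List.pyRange 0 (k : Int) 1).filter (fun i => i ≠ m1))
        (fun i => pvVal numbers i) = some m2 ∧
      pvP2 numbers (k : Int) m1 m2 := by
  intro k
  induction k with
  | zero => omega
  | succ k ih =>
      intro hk1
      rcases Nat.lt_or_ge k 2 with h | h
      · -- k + 1 = 2
        have hk : k = 1 := by omega
        subst hk
        have hr : PySem.List.pyRange 0 ((2 : Nat) : Int) 1 = [0, 1] := by decide
        rw [hr]
        by_cases c0 : m1 = 0
        · subst c0
          refine ⟨1, by simp [PySem.List.min?], by omega, by omega, by omega, ?_, by omega⟩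
          intro j hj0 hj2 hjne
          have : j = 1 := by omega
          simp [this]
        · by_cases c1 : m1 = 1
          · subst c1
            refine ⟨0, by simp [PySem.List.min?], by omega, by omega, by omega, ?_, by omega⟩
            intro j hj0 hj2 hjne
            have : j = 0 := by omega
            simp [this]
          · by_cases c : pvVal numbers 1 < pvVal numbers 0
            · refine ⟨1, ?_, by omega, by omega, by omega, ?_, ?_⟩
              · simp [PySem.List.min?, c, show (0 : Int) ≠ m1 by omega, show (1 : Int) ≠ m1 by omega]
              · intro j hj0 hj2 hjne
                have : j = 0 ∨ j = 1 := by omega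
                rcases this with h | h <;> simp [h] <;> omega
              · intro j hj0 hj1 hjne
                have : j = 0 := by omega
                simp [this]; omega
            · refine ⟨0, ?_, by omega, by omega, by omega, ?_, by omega⟩
              · simp [PySem.List.min?, c, show (0 : Int) ≠ m1 by omega, show (1 : Int) ≠ m1 by omega]
              · intro j hj0 hj2 hjne
                have : j = 0 ∨ j = 1 := by omega
                rcases this with h | h <;> simp [h]; omega
      · -- k ≥ 2
        obtain ⟨m2, hm, hp⟩ := ih h
        have hcast : ((k + 1 : Nat) : Int) = (k : Int) + 1 := by push_cast; ring
        rw [hcast, PySem.List.pyRange_one_succ_right (by positivity), List.filter_append]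
        obtain ⟨hm0, hmk, hmne, hle, hlt⟩ := hp
        by_cases ck : (k : Int) = m1
        · rw [show List.filter (fun i => decide (i ≠ m1)) [(k : Int)] = [] by simp [ck]]
          refine ⟨m2, by simpa using hm, hm0, by omega, hmne, ?_, hlt⟩
          intro j hj0 hjn hjne
          rcases lt_or_ge j (k : Int) with hj | hj
          · exact hle j hj0 hj hjne
          · omega
        · rw [show List.filter (fun i => decide (i ≠ m1)) [(k : Int)] = [(k : Int)] by simp [ck]]
          rw [pvMin?_append_singleton, hm]
          by_cases c : pvVal numbers (k : Int) < pvVal numbers m2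
          · refine ⟨(k : Int), by simp [c], by omega, by omega, ck, ?_, ?_⟩
            · intro j hj0 hjn hjne
              rcases lt_or_ge j (k : Int) with hj | hj
              · have := hle j hj0 hj hjne; omega
              · have : j = (k : Int) := by omega
                simp [this]
            · intro j hj0 hjk hjne
              have := hle j hj0 (by omega) hjne; omega
          · refine ⟨m2, by simp [c], hm0, by omega, hmne, ?_, hlt⟩
            intro j hj0 hjn hjne
            rcases lt_or_ge j (k : Int) with hj | hj
            · exact hle j hj0 hj hjne
            · have : j = (k : Int) := by omega
              simp [this]; omega

-- ===== VERDICT (by name: the statement is the Claim_ definition above) =====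
theorem find_two_lowest_indexes_spec : Claim_equal_find_two_lowest_indexes := by
  intro numbers _ hpre
  unfold Pre_find_two_lowest_indexes at hpre
  unfold Spec_find_two_lowest_indexes find_two_lowest_indexes find_two_lowest_indexes_alt
  have hlt : ¬ numbers.length < 2 := by omega
  simp only [if_neg hlt]
  -- A's result satisfies the invariant at n = numbers.length
  have hA := pvA_inv numbers (numbers.length - 2)
  have hcast : (2 : Int) + ((numbers.length - 2 : Nat) : Int) = (numbers.length : Int) := by
    push_cast [Nat.cast_sub hpre]; ring
  rw [hcast] at hA
  -- B's two minima
  obtain ⟨m1, hm1, hp1⟩ := pvB1 numbers numbers.length (by omega)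
  obtain ⟨m2, hm2, hp2⟩ := pvB2 numbers m1 numbers.length hpre
  rw [hm1]
  simp only [hm2]
  have e1 : (((PySem.List.pyRange 2 (numbers.length : Int) 1).foldl (pvStepA numbers)
      (if pvVal numbers 0 > pvVal numbers 1 then ((1 : Int), (0 : Int)) else (0, 1)))).1 = m1 :=
    pvP1_unique hA.1 hp1
  have hA2 := hA.2
  rw [e1] at hA2
  have e2 : (((PySem.List.pyRange 2 (numbers.length : Int) 1).foldl (pvStepA numbers)
      (if pvVal numbers 0 > pvVal numbers 1 then ((1 : Int), (0 : Int)) else (0, 1)))).2 = m2 :=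
    pvP2_unique hA2 hp2
  exact Prod.ext e1 e2
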